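-- pv_equiv track=rewrite | github.com/CjayRogers/Learnable-Technical-Skill | CJ.py | nth_most_rare
-- ===== SOURCE A (Python) =====
-- def nth_most_rare(lst, n):
--     # Count occurrences of each element
--     count_dict = {}
--     for num in lst:
--         count_dict[num] = count_dict.get(num, 0) + 1
--
--     # Sort the unique elements based on their occurrence count
--     sorted_items = sorted(count_dict.items(), key=lambda x: x[1])
--
--     # Return the nth rarest item
--     if n <= len(sorted_items):
--         return sorted_items[n - 1][0]
--     else:
--         return None  # Return None if n is greater than the number of unique elements
-- ===== SOURCE B (Python) =====
-- def nth_most_rare(lst, n):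
--     # Counting sort by frequency: group the unique elements (first-appearance
--     # order) into a dict keyed by their count, then scan counts 1..len(lst)
--     # collecting the groups from rarest to most common.
--     counts = {}
--     for x in lst:
--         if x in counts:
--             counts[x] += 1
--         else:
--             counts[x] = 1
--     buckets = {}
--     for x, c in counts.items():
--         buckets.setdefault(c, []).append(x)
--     ordered = []
--     for c in range(1, len(lst) + 1):
--         ordered += buckets.get(c, [])
--     if n <= len(ordered):
--         return ordered[n - 1]
--     return None
-- ===== Notes on version B (the rewrite author's own statement) =====
-- stated objective: alternative
-- what changed: A comparison-sorts the (element, count) pairs with sorted(key=count); B never sorts: it groups the unique elements into a dict keyed by their count and then scans counts 1..len(lst) in increasing order, concatenating the groups, which reproduces the stable sort order (ties by first appearance).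
import Mathlib
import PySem

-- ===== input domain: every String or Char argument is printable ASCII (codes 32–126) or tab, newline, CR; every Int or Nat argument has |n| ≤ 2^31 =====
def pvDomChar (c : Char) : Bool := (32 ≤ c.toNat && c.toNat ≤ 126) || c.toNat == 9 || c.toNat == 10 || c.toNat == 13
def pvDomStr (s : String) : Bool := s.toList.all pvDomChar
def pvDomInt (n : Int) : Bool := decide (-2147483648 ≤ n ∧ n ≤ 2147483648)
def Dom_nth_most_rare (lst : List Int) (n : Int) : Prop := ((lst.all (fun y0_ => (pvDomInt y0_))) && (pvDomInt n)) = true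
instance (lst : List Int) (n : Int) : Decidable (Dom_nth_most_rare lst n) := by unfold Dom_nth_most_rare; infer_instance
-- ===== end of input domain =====

-- B replaces A's comparison sort of the (element, count) pairs with a counting sort: a dict
-- of buckets keyed by count, flattened by an increasing scan of the counts (alternative algorithm).


-- ===== PORT A =====
def nth_most_rare (lst : List Int) (n : Int) : Option Int :=
  let count_dict := lst.foldl (fun d num => d.insert num (d.getD num 0 + 1)) (PySem.Dict.empty : PySem.Dict Int Int)
  let sorted_items := PySem.List.sorted count_dict.items (fun x => x.2)
  if n ≤ (sorted_items.length : Int) then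
    match PySem.List.pyGet? sorted_items (n - 1) with
    | some p => some p.1
    | none => none        -- IndexError (n - 1 below -len); excluded by Pre_
  else none

-- ===== PORT B =====
def nth_most_rare_alt (lst : List Int) (n : Int) : Option Int :=
  let counts := lst.foldl
    (fun cs x => match cs.get? x with
      | some v => cs.insert x (v + 1)
      | none => cs.insert x 1)
    (PySem.Dict.empty : PySem.Dict Int Int)
  let buckets := counts.items.foldl
    (fun bk p => bk.modify p.2 [] (fun ys => ys ++ [p.1]))
    (PySem.Dict.empty : PySem.Dict Int (List Int))
  let ordered := (PySem.List.pyRange 1 ((lst.length : Int) + 1) 1).foldl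
    (fun acc c => acc ++ buckets.getD c []) []
  if n ≤ (ordered.length : Int) then
    PySem.List.pyGet? ordered (n - 1)   -- none = IndexError, same guard as A; excluded by Pre_
  else none

-- ===== PRECONDITION & SPEC =====
-- Pre_ excludes exactly the inputs where Python A (and B) raise IndexError:
-- n ≤ #distinct but n - 1 < -#distinct (in particular the empty list with n ≤ 0).
def Pre_nth_most_rare (lst : List Int) (n : Int) : Prop :=
  1 - ((PySem.List.dedup lst).length : Int) ≤ n
instance (lst : List Int) (n : Int) : Decidable (Pre_nth_most_rare lst n) := by
  unfold Pre_nth_most_rare; infer_instance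
def pvWitness_nth_most_rare : List Int × Int := ([1, 1, 2], 1)

def Spec_nth_most_rare (lst : List Int) (n : Int) (out : Option Int) : Prop := out = nth_most_rare_alt lst n
instance (lst : List Int) (n : Int) (out : Option Int) : Decidable (Spec_nth_most_rare lst n out) := by unfold Spec_nth_most_rare; infer_instance

-- ===== CLAIM (what is proved, stated in full; the proofs are below) =====
def Claim_equal_nth_most_rare : Prop := ∀ (lst : List Int) (n : Int), Dom_nth_most_rare lst n → Pre_nth_most_rare lst n → Spec_nth_most_rare lst n (nth_most_rare lst n)

-- ===== LEMMAS AND PROOFS =====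
-- L1: insertBy passes over a prefix it does not insert before
theorem insertBy_append_not_before {α : Type} (before : α → α → Bool) (x : α)
    (ys1 ys2 : List α) (h : ∀ y ∈ ys1, before x y = false) :
    PySem.List.insertBy before x (ys1 ++ ys2) = ys1 ++ PySem.List.insertBy before x ys2 := by
  induction ys1 with
  | nil => rfl
  | cons y t ih =>
    simp [PySem.List.insertBy, h y (by simp), ih (fun z hz => h z (by simp [hz]))]

-- L2: insertBy puts x in front when it goes before everything
theorem insertBy_cons_of_forall (before : Int × Int → Int × Int → Bool) (x : Int × Int)
    (ys : List (Int × Int)) (h : ∀ y ∈ ys, before x y = true) :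
    PySem.List.insertBy before x ys = x :: ys := by
  cases ys with
  | nil => rfl
  | cons y t => simp [PySem.List.insertBy, h y (by simp)]

-- L3: stable sort by an Int key in [0, m) is the flatten of the count-indexed buckets
theorem sorted_eq_buckets (m : Nat) (l : List (Int × Int))
    (h : ∀ p ∈ l, 0 ≤ p.2 ∧ p.2 < (m : Int)) :
    PySem.List.sorted l (fun p => p.2) =
      ((List.range m).map (fun i : Nat => l.filter (fun p => p.2 == (i : Int)))).flatten := by
  induction l using List.reverseRecOn with
  | nil => simp [PySem.List.sorted_eq_foldl_insertBy]
  | append_singleton l x ih =>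
    have hx := h x (by simp)
    have hl : ∀ p ∈ l, 0 ≤ p.2 ∧ p.2 < (m : Int) := fun p hp => h p (by simp [hp])
    set c : Nat := x.2.toNat with hc
    have hxc : x.2 = (c : Int) := by omega
    have hcm : c + 1 ≤ m := by omega
    have hsplit : m = (c + 1) + (m - (c + 1)) := by omega
    rw [PySem.List.sorted_eq_foldl_insertBy, List.foldl_append, List.foldl_cons, List.foldl_nil,
        ← PySem.List.sorted_eq_foldl_insertBy, ih hl]
    set f : Nat → List (Int × Int) := fun i : Nat => l.filter (fun p => p.2 == (i : Int)) with hf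
    set g : Nat → List (Int × Int) := fun i : Nat => (l ++ [x]).filter (fun p => p.2 == (i : Int)) with hg
    have hgf : ∀ i : Nat, g i = f i ++ (if x.2 == (i : Int) then [x] else []) := by
      intro i; simp [hg, hf, List.filter_append, List.filter_singleton]
    have hfmem : ∀ i : Nat, ∀ p ∈ f i, p.2 = (i : Int) := by
      intro i p hp
      have := List.of_mem_filter hp
      simpa using this
    have hrange : List.range m = List.range (c+1) ++ (List.range (m - (c+1))).map ((c+1) + ·) := by
      conv_lhs => rw [hsplit]
      rw [List.range_add]
    rw [hrange]
    simp only [List.map_append, List.flatten_append]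
    set A := ((List.range (c+1)).map f).flatten with hA
    set B := (((List.range (m - (c+1))).map ((c+1) + ·)).map f).flatten with hB
    have hAy : ∀ y ∈ A, (decide (x.2 < y.2)) = false := by
      intro y hy
      simp only [hA, List.mem_flatten, List.mem_map] at hy
      obtain ⟨bk, ⟨i, hi, rfl⟩, hyb⟩ := hy
      have := hfmem i y hyb
      have hi' : i < c + 1 := List.mem_range.mp hi
      simp only [decide_eq_false_iff_not, not_lt, this, hxc]
      exact_mod_cast Nat.lt_succ_iff.mp hi'
    have hBy : ∀ y ∈ B, (decide (x.2 < y.2)) = true := by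
      intro y hy
      simp only [hB, List.mem_flatten, List.mem_map] at hy
      obtain ⟨bk, ⟨i, ⟨j, hj, rfl⟩, rfl⟩, hyb⟩ := hy
      have := hfmem _ y hyb
      simp only [decide_eq_true_eq, this, hxc]
      push_cast; omega
    rw [insertBy_append_not_before _ _ _ _ hAy, insertBy_cons_of_forall _ _ _ hBy]
    have hBg : (((List.range (m - (c+1))).map ((c+1) + ·)).map g).flatten = B := by
      rw [hB]
      congr 1
      apply List.map_congr_left
      intro i hi
      simp only [List.mem_map] at hi
      obtain ⟨j, hj, rfl⟩ := hi
      rw [hgf]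
      simp only [List.append_right_eq_self, ite_eq_right_iff, List.cons_ne_self]
      intro hbad
      simp only [beq_iff_eq] at hbad
      omega
    have hAg : ((List.range (c+1)).map g).flatten = A ++ [x] := by
      rw [List.range_succ, List.map_append, List.flatten_append, hA, List.range_succ,
          List.map_append, List.flatten_append]
      simp only [List.map_cons, List.map_nil, List.flatten_cons, List.flatten_nil, List.append_nil]
      have h1 : ((List.range c).map g).flatten = ((List.range c).map f).flatten := by
        congr 1
        apply List.map_congr_left
        intro i hi
        rw [hgf]
        have hi' := List.mem_range.mp hi
        simp only [List.append_right_eq_self, ite_eq_right_iff, List.cons_ne_self]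
        intro hbad
        simp only [beq_iff_eq] at hbad
        omega
      have h2 : g c = f c ++ [x] := by rw [hgf]; simp [hxc]
      rw [h1, h2, List.append_assoc]
    rw [hAg, hBg]
    simp

-- B's counting loop (membership test + two branches) builds the same dict as A's getD loop
theorem counts_loop_eq_counter (lst : List Int) :
    lst.foldl
      (fun cs x => match cs.get? x with
        | some v => cs.insert x (v + 1)
        | none => cs.insert x 1)
      (PySem.Dict.empty : PySem.Dict Int Int) = PySem.Dict.counter lst := by
  rw [← PySem.Dict.foldl_insert_getD_add_one_eq_counter]
  congr 1
  funext cs x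
  cases h : cs.get? x <;> simp [PySem.Dict.getD, h]

-- The bucket-filling dict fold, read back bucket by bucket
theorem dict_bucket_fold (l : List (Int × Int)) (b : PySem.Dict Int (List Int)) (c : Int) :
    (l.foldl (fun bk p => bk.modify p.2 [] (fun ys => ys ++ [p.1])) b).getD c []
      = b.getD c [] ++ (l.filter (fun p => p.2 == c)).map (·.1) := by
  induction l generalizing b with
  | nil => simp
  | cons p t ih =>
    rw [List.foldl_cons, ih, List.filter_cons]
    by_cases hpc : p.2 = c
    · subst hpc
      rw [PySem.Dict.getD_modify_self]
      simp
    · have hbeq : (p.2 == c) = false := by simpa using hpc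
      rw [PySem.Dict.getD_modify_of_ne]
      · simp [hbeq]
      · exact Ne.symm hpc

-- pyGet? commutes with map (same length, same index resolution)
theorem pyGet?_map (f : Int × Int → Int) (xs : List (Int × Int)) (i : Int) :
    PySem.List.pyGet? (xs.map f) i = (PySem.List.pyGet? xs i).map f := by
  simp [PySem.List.pyGet?, PySem.List.pyIdx?]

-- The two pipelines meet: B's concatenated buckets are A's stably-sorted items, keys only
theorem ordered_eq (lst : List Int) :
    (PySem.List.pyRange 1 ((lst.length : Int) + 1) 1).foldl
        (fun acc c =>
          acc ++ ((PySem.Dict.counter lst).items.foldl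
            (fun bk p => bk.modify p.2 [] (fun ys => ys ++ [p.1]))
            (PySem.Dict.empty : PySem.Dict Int (List Int))).getD c []) []
      = (PySem.List.sorted (PySem.Dict.counter lst).items (fun x => x.2)).map (·.1) := by
  set d := PySem.Dict.counter lst with hd
  have hbound : ∀ p ∈ d.items, 1 ≤ p.2 ∧ p.2 ≤ (lst.length : Int) := by
    intro p hp
    rw [hd, PySem.Dict.items_counter] at hp
    obtain ⟨k, hk, rfl⟩ := List.mem_map.mp hp
    have hkl : k ∈ lst := by simpa [PySem.Set.mem_ofList] using hk
    constructor
    · have := List.count_pos_iff.mpr hkl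
      simpa using this
    · have := List.count_le_length (l := lst) (a := k)
      simpa using this
  have hbounds2 : ∀ p ∈ d.items, 0 ≤ p.2 ∧ p.2 < ((lst.length + 1 : Nat) : Int) := by
    intro p hp
    have := hbound p hp
    push_cast
    omega
  -- left side: a flatMap of buckets over the counts 1..len
  rw [PySem.List.foldl_append_eq_flatMap]
  simp only [List.nil_append]
  -- each bucket read back as a filter of the items
  have hbk : ∀ c : Int,
      ((d.items.foldl (fun bk p => bk.modify p.2 [] (fun ys => ys ++ [p.1]))
        (PySem.Dict.empty : PySem.Dict Int (List Int))).getD c [])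
        = (d.items.filter (fun p => p.2 == c)).map (·.1) := by
    intro c
    rw [dict_bucket_fold]
    simp
  -- right side: the bucketed form of the stable sort
  rw [sorted_eq_buckets (lst.length + 1) d.items hbounds2]
  rw [List.map_flatten, List.map_map]
  -- bucket 0 is empty (every count is ≥ 1)
  have h0 : d.items.filter (fun p => p.2 == ((0 : Nat) : Int)) = [] := by
    rw [List.filter_eq_nil_iff]
    intro p hp
    have := hbound p hp
    simp only [beq_iff_eq, Nat.cast_zero]
    omega
  -- align the two index lists
  have hrange : PySem.List.pyRange 1 ((lst.length : Int) + 1) 1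
      = (List.range lst.length).map (fun k : Nat => (((k + 1) : Nat) : Int)) := by
    rw [PySem.List.pyRange_one]
    have hlen : (((lst.length : Int) + 1) - 1).toNat = lst.length := by omega
    rw [hlen]
    apply List.map_congr_left
    intro k _
    push_cast
    omega
  rw [hrange, List.flatMap_map, List.range_succ_eq_map, List.map_cons, List.flatten_cons]
  simp only [Function.comp, h0, List.map_nil, List.nil_append]
  rw [List.flatMap_def]
  congr 1
  rw [List.map_map]
  apply List.map_congr_left
  intro k _
  simp only [Function.comp_apply, Nat.succ_eq_add_one]
  rw [hbk]

-- ===== VERDICT (by name: the statement is the Claim_ definition above) =====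
theorem nth_most_rare_spec : Claim_equal_nth_most_rare := by
  intro lst n _ _
  simp only [Spec_nth_most_rare, nth_most_rare, nth_most_rare_alt]
  rw [PySem.Dict.foldl_insert_getD_add_one_eq_counter, counts_loop_eq_counter, ordered_eq lst]
  rw [List.length_map, pyGet?_map]
  cases PySem.List.pyGet? (PySem.List.sorted (PySem.Dict.counter lst).items fun x => x.2) (n - 1) <;>
    simp
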